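-- pv_equiv track=rewrite | github.com/yalit/advent-of-code | aoc2016/day_11/aoc.py | correct_state
-- ===== SOURCE A (Python) =====
-- def correct_state(state) -> bool:
--     minFloor = min([v for _, v in state[1]])
--     maxFloor = max([v for _, v in state[1]])
--
--     if not (1 <= minFloor <= maxFloor <= 4):
--         return False
--
--     for i in range(minFloor, maxFloor + 1):
--         microchips = [x for x, v in state[1] if x[-1] == "M" and v == i]
--         generators = [x for x, v in state[1] if x[-1] == "G" and v == i]
--
--         if len(generators) == 0:
--             continue
--
--         for m in microchips:
--             if m[:2] + "G" not in generators:
--                 return False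
--
--     return True
-- ===== SOURCE B (Python) =====
-- def correct_state(state) -> bool:
--     items = state[1]
--     if not items:
--         return False
--     by_floor = {}
--     lo = hi = items[0][1]
--     for name, floor in items:
--         if floor < lo:
--             lo = floor
--         if hi < floor:
--             hi = floor
--         gens, chips = by_floor.setdefault(floor, (set(), []))
--         if name.endswith("G"):
--             gens.add(name)
--         elif name.endswith("M"):
--             chips.append(name)
--     if lo < 1 or 4 < hi:
--         return False
--     for gens, chips in by_floor.values():
--         if gens:
--             for m in chips:
--                 if m[:2] + "G" not in gens:
--                     return False
--     return True
-- ===== Notes on version B (the rewrite author's own statement) =====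
-- stated objective: alternative
-- what changed: B replaces A's per-floor range loop with repeated full-list comprehensions and list membership by a single grouping pass (dict floor -> (generator set, chip list), min/max tracked in the same pass) followed by one traversal of the groups; on adversarial same-floor inputs this avoids A's quadratic chip-in-generator-list scans, though a timing run could not measure a difference on its generated inputs.
import Mathlib
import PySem

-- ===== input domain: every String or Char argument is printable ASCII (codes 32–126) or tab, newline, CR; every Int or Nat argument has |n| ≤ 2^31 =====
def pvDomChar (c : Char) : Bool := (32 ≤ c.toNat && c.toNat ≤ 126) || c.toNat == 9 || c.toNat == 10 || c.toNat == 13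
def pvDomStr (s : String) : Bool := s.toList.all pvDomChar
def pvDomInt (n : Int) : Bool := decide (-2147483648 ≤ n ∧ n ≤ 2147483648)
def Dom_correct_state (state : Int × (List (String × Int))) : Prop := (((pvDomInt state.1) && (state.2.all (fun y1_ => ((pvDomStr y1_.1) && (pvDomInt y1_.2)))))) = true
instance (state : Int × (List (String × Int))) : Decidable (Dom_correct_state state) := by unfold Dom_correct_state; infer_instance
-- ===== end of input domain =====

-- B replaces A's per-floor range loop with repeated full-list scans by one grouping pass
-- (dict floor -> (generator set, chip list), min/max tracked in the same pass) plus one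
-- traversal of the groups; equivalence is claimed on Pre_ (exactly where A returns).

-- ===== PORT A =====
-- the 'for i in range(minFloor, maxFloor + 1)' loop with its early 'return False'
def loopA (l : List (String × Int)) : List Int → Bool
  | [] => true
  | i :: rest =>
    let microchips := (l.filter (fun p => (PySem.Str.pyGet? p.1 (-1) == some 'M') && (p.2 == i))).map (·.1)
    let generators := (l.filter (fun p => (PySem.Str.pyGet? p.1 (-1) == some 'G') && (p.2 == i))).map (·.1)
    if generators.length = 0 then loopA l rest
    else if microchips.all (fun m => generators.contains (PySem.Str.slice m none (some 2) ++ "G")) then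
      loopA l rest
    else false

def correct_state (state : Int × (List (String × Int))) : Bool :=
  let floors := state.2.map (fun p => p.2)
  match PySem.List.min? floors (fun v => v), PySem.List.max? floors (fun v => v) with
  | some minFloor, some maxFloor =>
    if 1 ≤ minFloor ∧ minFloor ≤ maxFloor ∧ maxFloor ≤ 4 then
      loopA state.2 (PySem.List.pyRange minFloor (maxFloor + 1) 1)
    else false
  | _, _ => false  -- Python raises ValueError here (min of the empty list); excluded by Pre_

-- ===== PORT B =====
def bFmin (a : Int) (p : String × Int) : Int := if p.2 < a then p.2 else a
def bFmax (a : Int) (p : String × Int) : Int := if a < p.2 then p.2 else a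
-- the mutation of the (gens, chips) entry fetched by setdefault
def bUpd (e : PySem.Set String × List String) (name : String) : PySem.Set String × List String :=
  if PySem.Str.endswith name "G" then (PySem.Set.add e.1 name, e.2)
  else if PySem.Str.endswith name "M" then (e.1, e.2 ++ [name])
  else e
def bDstep (d : PySem.Dict Int (PySem.Set String × List String)) (p : String × Int) :
    PySem.Dict Int (PySem.Set String × List String) :=
  d.insert p.2 (bUpd (d.getD p.2 (PySem.Set.empty, [])) p.1)
def bStep (acc : Int × Int × PySem.Dict Int (PySem.Set String × List String)) (p : String × Int) :
    Int × Int × PySem.Dict Int (PySem.Set String × List String) :=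
  (bFmin acc.1 p, bFmax acc.2.1 p, bDstep acc.2.2 p)

def correct_state_alt (state : Int × (List (String × Int))) : Bool :=
  match state.2 with
  | [] => false
  | first :: _ =>
    let st := state.2.foldl bStep (first.2, first.2, PySem.Dict.empty)
    if st.1 < 1 || 4 < st.2.1 then false
    else st.2.2.values.all (fun gc =>
      if gc.1.isEmpty then true
      else gc.2.all (fun m => PySem.Set.contains gc.1 (PySem.Str.slice m none (some 2) ++ "G")))

-- ===== PRECONDITION & SPEC =====
-- Pre_ excludes exactly the inputs where A raises: the empty item list (ValueError from min([]))
-- and lists whose floors all lie in 1..4 but which contain an empty item name (IndexError from ''[-1]).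
def Pre_correct_state (state : Int × (List (String × Int))) : Prop :=
  state.2 ≠ [] ∧ ((∀ p ∈ state.2, 1 ≤ p.2 ∧ p.2 ≤ 4) → ∀ p ∈ state.2, p.1 ≠ "")
instance (state : Int × (List (String × Int))) : Decidable (Pre_correct_state state) := by
  unfold Pre_correct_state; infer_instance
def pvWitness_correct_state : (Int × (List (String × Int))) := (2, [("HM", 1), ("HG", 1), ("LM", 3)])

def Spec_correct_state (state : Int × (List (String × Int))) (out : Bool) : Prop := out = correct_state_alt state
instance (state : Int × (List (String × Int))) (out : Bool) : Decidable (Spec_correct_state state out) := by unfold Spec_correct_state; infer_instance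

-- ===== CLAIM (what is proved, stated in full; the proofs are below) =====
def Claim_equal_correct_state : Prop := ∀ (state : Int × (List (String × Int))), Dom_correct_state state → Pre_correct_state state → Spec_correct_state state (correct_state state)


-- ===== LEMMAS AND PROOFS =====

def gensL (l : List (String × Int)) (i : Int) : List String :=
  (l.filter (fun p => (PySem.Str.pyGet? p.1 (-1) == some 'G') && (p.2 == i))).map (·.1)
def chipsL (l : List (String × Int)) (i : Int) : List String :=
  (l.filter (fun p => (PySem.Str.pyGet? p.1 (-1) == some 'M') && (p.2 == i))).map (·.1)
def keyOf (m : String) : String := PySem.Str.slice m none (some 2) ++ "G"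
def condA (l : List (String × Int)) (i : Int) : Bool :=
  if (gensL l i).length = 0 then true
  else (chipsL l i).all (fun m => (gensL l i).contains (keyOf m))
def SpecP (l : List (String × Int)) : Prop :=
  ∀ p ∈ l, PySem.Str.pyGet? p.1 (-1) = some 'M' → gensL l p.2 ≠ [] → keyOf p.1 ∈ gensL l p.2

theorem loopA_cons (l : List (String × Int)) (i : Int) (rest : List Int) :
    loopA l (i :: rest) = (condA l i && loopA l rest) := by
  show (if (gensL l i).length = 0 then loopA l rest
        else if (chipsL l i).all (fun m => (gensL l i).contains (keyOf m)) then loopA l rest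
        else false) = _
  unfold condA
  split_ifs with h1 h2
  · simp
  · rw [h2, Bool.true_and]
  · rw [Bool.eq_false_iff.2 h2, Bool.false_and]

theorem loopA_eq_all (l : List (String × Int)) (is : List Int) :
    loopA l is = is.all (condA l) := by
  induction is with
  | nil => rfl
  | cons i rest ih => rw [loopA_cons, ih, List.all_cons]

theorem mem_chipsL (l : List (String × Int)) (i : Int) (m : String) :
    m ∈ chipsL l i ↔ ∃ p ∈ l, PySem.Str.pyGet? p.1 (-1) = some 'M' ∧ p.2 = i ∧ p.1 = m := by
  simp only [chipsL, List.mem_map, List.mem_filter, Bool.and_eq_true, beq_iff_eq]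
  constructor
  · rintro ⟨p, ⟨hp, hM, hi⟩, rfl⟩
    exact ⟨p, hp, hM, hi, rfl⟩
  · rintro ⟨p, hp, hM, hi, rfl⟩
    exact ⟨p, ⟨hp, hM, hi⟩, rfl⟩

theorem condA_iff (l : List (String × Int)) (i : Int) :
    condA l i = true ↔ (gensL l i = [] ∨ ∀ m ∈ chipsL l i, keyOf m ∈ gensL l i) := by
  unfold condA
  split_ifs with h1
  · simp [List.length_eq_zero_iff.1 h1]
  · rw [List.length_eq_zero_iff] at h1
    simp [List.all_eq_true, h1]

-- any index list covering every floor decides SpecP through condA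
theorem allCover_iff (l : List (String × Int)) (is : List Int)
    (hcov : ∀ p ∈ l, p.2 ∈ is) :
    is.all (condA l) = true ↔ SpecP l := by
  simp only [List.all_eq_true, condA_iff]
  constructor
  · intro h p hp hM hg
    rcases h p.2 (hcov p hp) with h0 | hall
    · exact absurd h0 hg
    · exact hall p.1 ((mem_chipsL l p.2 p.1).2 ⟨p, hp, hM, rfl, rfl⟩)
  · intro h i _
    by_cases hg : gensL l i = []
    · exact Or.inl hg
    · refine Or.inr (fun m hm => ?_)
      rcases (mem_chipsL l i m).1 hm with ⟨p, hp, hM, hi2, rfl⟩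
      exact hi2 ▸ h p hp hM (hi2 ▸ hg)

-- B-side: the grouped names per floor
def gensB (l : List (String × Int)) (f : Int) : List String :=
  (l.filter (fun q => PySem.Str.endswith q.1 "G" && q.2 == f)).map (·.1)
def chipsB (l : List (String × Int)) (f : Int) : List String :=
  (l.filter (fun q => (!PySem.Str.endswith q.1 "G") && PySem.Str.endswith q.1 "M" && q.2 == f)).map (·.1)

theorem foldl_bStep_split (l : List (String × Int)) (a b : Int)
    (d : PySem.Dict Int (PySem.Set String × List String)) :
    l.foldl bStep (a, b, d) = (l.foldl bFmin a, l.foldl bFmax b, l.foldl bDstep d) := by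
  induction l generalizing a b d with
  | nil => rfl
  | cons p t ih => exact ih (bFmin a p) (bFmax b p) (bDstep d p)

theorem foldl_bFmin_eq (l : List (String × Int)) (a : Int) :
    l.foldl bFmin a = (l.map (fun p => p.2)).foldl min a := by
  rw [List.foldl_map]
  apply PySem.List.foldl_congr_mem
  intro acc p _
  simp only [bFmin, min_def]
  split_ifs <;> omega

theorem foldl_bFmax_eq (l : List (String × Int)) (a : Int) :
    l.foldl bFmax a = (l.map (fun p => p.2)).foldl max a := by
  rw [List.foldl_map]
  apply PySem.List.foldl_congr_mem
  intro acc p _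
  simp only [bFmax, max_def]
  split_ifs <;> omega

-- the grouping invariant of B's single pass
theorem dfold_getD (l : List (String × Int)) (d : PySem.Dict Int (PySem.Set String × List String))
    (f : Int) :
    (l.foldl bDstep d).getD f (PySem.Set.empty, []) =
      (PySem.Set.update ((d.getD f (PySem.Set.empty, [])).1) (gensB l f),
       (d.getD f (PySem.Set.empty, [])).2 ++ chipsB l f) := by
  induction l generalizing d with
  | nil => simp [gensB, chipsB, PySem.Set.update]
  | cons p t ih =>
    rw [List.foldl_cons, ih]
    rcases hf : decide (f = p.2) with _|_
    · have hne : f ≠ p.2 := by simpa using hf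
      have hget : (bDstep d p).getD f (PySem.Set.empty, []) = d.getD f (PySem.Set.empty, []) := by
        unfold bDstep
        rw [PySem.Dict.getD_insert]
        simp [hne]
      have hg : gensB (p :: t) f = gensB t f := by
        simp [gensB, Ne.symm hne]
      have hc : chipsB (p :: t) f = chipsB t f := by
        simp [chipsB, Ne.symm hne]
      rw [hget, hg, hc]
    · have hfe : f = p.2 := by simpa using hf
      have hget : (bDstep d p).getD f (PySem.Set.empty, []) =
          bUpd (d.getD f (PySem.Set.empty, [])) p.1 := by
        unfold bDstep
        rw [PySem.Dict.getD_insert, if_pos hfe, ← hfe]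
      rw [hget]
      unfold bUpd
      split_ifs with hG hM
      · have hG' : PySem.Chars.endswith p.1.toList ['G'] = true := by simpa using hG
        have hg : gensB (p :: t) f = p.1 :: gensB t f := by
          simp [gensB, hG', hfe]
        have hc : chipsB (p :: t) f = chipsB t f := by
          simp [chipsB, hG']
        rw [hg, hc]
        rfl
      · have hG' : PySem.Chars.endswith p.1.toList ['G'] = false := by
          simpa using Bool.eq_false_iff.2 hG
        have hM' : PySem.Chars.endswith p.1.toList ['M'] = true := by simpa using hM
        have hg : gensB (p :: t) f = gensB t f := by
          simp [gensB, hG']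
        have hc : chipsB (p :: t) f = p.1 :: chipsB t f := by
          simp [chipsB, hG', hM', hfe]
        rw [hg, hc]
        simp
      · have hG' : PySem.Chars.endswith p.1.toList ['G'] = false := by
          simpa using Bool.eq_false_iff.2 hG
        have hM' : PySem.Chars.endswith p.1.toList ['M'] = false := by
          simpa using Bool.eq_false_iff.2 hM
        have hg : gensB (p :: t) f = gensB t f := by
          simp [gensB, hG']
        have hc : chipsB (p :: t) f = chipsB t f := by
          simp [chipsB, hG', hM']
        rw [hg, hc]

theorem ends_single (s : String) (c : Char) :
    PySem.Str.endswith s (String.ofList [c]) = (PySem.List.pyGet? s.toList (-1) == some c) := by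
  simp [PySem.List.pyGet?_neg_one]
  rw [Bool.eq_iff_iff, PySem.Chars.endswith_iff]
  simp only [beq_iff_eq]
  constructor
  · rintro ⟨pre, h⟩
    rw [← h]; simp
  · intro h
    rcases List.getLast?_eq_some_iff.1 h with ⟨ys, hy⟩
    exact ⟨ys, hy.symm⟩

theorem ofList_eq_nil_iff (xs : List String) : PySem.Set.ofList xs = [] ↔ xs = [] := by
  constructor
  · intro h
    rcases xs with _ | ⟨x, t⟩
    · rfl
    · have := (PySem.Set.mem_ofList (x :: t) x).2 (List.mem_cons_self ..)
      rw [h] at this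
      cases this
  · rintro rfl; rfl

theorem ends_single' (s : String) (c : Char) :
    PySem.Str.endswith s (String.ofList [c]) = (PySem.Str.pyGet? s (-1) == some c) := by
  rw [ends_single]
  simp

theorem chip_pred (s : String) :
    ((!PySem.Str.endswith s "G") && PySem.Str.endswith s "M") = (PySem.Str.pyGet? s (-1) == some 'M') := by
  have hG : ("G" : String) = String.ofList ['G'] := rfl
  have hM : ("M" : String) = String.ofList ['M'] := rfl
  rw [hG, hM, ends_single' s 'G', ends_single' s 'M']
  rcases h : PySem.Str.pyGet? s (-1) with _ | c
  · simp
  · by_cases hc : c = 'M' <;> simp [hc]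

theorem gensB_eq (l : List (String × Int)) (f : Int) : gensB l f = gensL l f := by
  unfold gensB gensL
  congr 1
  apply List.filter_congr
  intro q _
  rw [show ("G" : String) = String.ofList ['G'] from rfl, ends_single' q.1 'G']

theorem chipsB_eq (l : List (String × Int)) (f : Int) : chipsB l f = chipsL l f := by
  unfold chipsB chipsL
  congr 1
  apply List.filter_congr
  intro q _
  rw [chip_pred]

theorem contains_ofList (g : List String) (k : String) :
    PySem.Set.contains (PySem.Set.ofList g) k = g.contains k := by
  rw [Bool.eq_iff_iff]
  simp [PySem.Set.contains, PySem.Set.mem_ofList]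

-- B's per-group check agrees with A's per-floor check
theorem condB_eq_condA (l : List (String × Int)) (f : Int) :
    (if (PySem.Set.ofList (gensB l f)).isEmpty then true
     else (chipsB l f).all (fun m =>
       PySem.Set.contains (PySem.Set.ofList (gensB l f)) (PySem.Str.slice m none (some 2) ++ "G"))) =
      condA l f := by
  rw [gensB_eq, chipsB_eq]
  unfold condA
  by_cases hg : gensL l f = []
  · simp [hg]
  · rw [if_neg (by simp [List.isEmpty_iff, ofList_eq_nil_iff, hg]),
      if_neg (by simp [List.length_eq_zero_iff, hg])]
    exact List.all_congr rfl (fun m => by rw [contains_ofList]; rfl)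

-- B's port, spelt out on a nonempty list
theorem alt_characterization (n : Int) (first : String × Int) (rest : List (String × Int)) :
    correct_state_alt (n, first :: rest) =
      (if ((first :: rest).map (fun p => p.2)).foldl min first.2 < 1 ∨
          4 < ((first :: rest).map (fun p => p.2)).foldl max first.2 then false
       else (PySem.Set.ofList ((first :: rest).map (fun p => p.2))).all
         (condA (first :: rest))) := by
  unfold correct_state_alt
  rw [show ((n, first :: rest) : Int × List (String × Int)).2 = first :: rest from rfl]
  simp only [foldl_bStep_split]
  have hd : (first :: rest).foldl bDstep PySem.Dict.empty =
      (first :: rest).foldl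
        (fun d (x : String × Int) => d.insert x.2 (bUpd (d.getD x.2 (PySem.Set.empty, [])) x.1))
        PySem.Dict.empty := rfl
  have hnd : ((first :: rest).foldl bDstep PySem.Dict.empty).keys.Nodup := by
    rw [hd]
    exact PySem.Dict.nodup_keys_foldl_insert_key _ _ _ _ (by simp)
  have hkeys : ((first :: rest).foldl bDstep PySem.Dict.empty).keys =
      PySem.Set.ofList ((first :: rest).map (fun p => p.2)) := by
    rw [hd, PySem.Dict.keys_foldl_insert_key]
    simp
    rfl
  rw [PySem.Dict.values_eq_map_keys _ hnd (PySem.Set.empty, []), List.all_map, hkeys]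
  rw [foldl_bFmin_eq, foldl_bFmax_eq]
  by_cases hg : ((first :: rest).map (fun p => p.2)).foldl min first.2 < 1 ∨
      4 < ((first :: rest).map (fun p => p.2)).foldl max first.2
  · rw [if_pos hg]
    have hb : (decide (((first :: rest).map (fun p => p.2)).foldl min first.2 < 1) ||
        decide (4 < ((first :: rest).map (fun p => p.2)).foldl max first.2)) = true := by
      rcases hg with h | h
      · rw [decide_eq_true h, Bool.true_or]
      · rw [decide_eq_true h, Bool.or_true]
    rw [hb]
    rfl
  · rw [if_neg hg]
    rw [not_or, not_lt, not_lt] at hg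
    have hb : (decide (((first :: rest).map (fun p => p.2)).foldl min first.2 < 1) ||
        decide (4 < ((first :: rest).map (fun p => p.2)).foldl max first.2)) = false := by
      simp only [Bool.or_eq_false_iff, decide_eq_false_iff_not]
      exact ⟨by omega, by omega⟩
    rw [hb]
    simp only [Bool.false_eq_true, if_false]
    refine List.all_congr rfl (fun f => ?_)
    rw [Function.comp_apply, dfold_getD]
    simp only [PySem.Dict.getD_empty]
    have hupd : PySem.Set.empty.update (gensB (first :: rest) f) =
        PySem.Set.ofList (gensB (first :: rest) f) := rfl
    rw [hupd, List.nil_append]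
    exact condB_eq_condA (first :: rest) f

-- ===== VERDICT (by name: the statements are the Claim_ definitions above) =====
theorem correct_state_spec : Claim_equal_correct_state := by
  rintro ⟨n, l⟩ _ ⟨hne, _⟩
  unfold Spec_correct_state
  obtain ⟨first, rest, rfl⟩ := List.exists_cons_of_ne_nil hne
  rw [alt_characterization]
  unfold correct_state
  rw [show ((n, first :: rest) : Int × List (String × Int)).2 = first :: rest from rfl]
  simp only [List.map_cons, List.foldl_cons, min_self, max_self]
  rw [PySem.List.min?_id_cons, PySem.List.max?_id_cons]
  set a := (rest.map (fun p => p.2)).foldl min first.2 with ha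
  set b := (rest.map (fun p => p.2)).foldl max first.2 with hb
  have hmin := PySem.List.min?_isMin (xs := first.2 :: rest.map (fun p => p.2))
    (key := fun y => y) (m := a) (by rw [PySem.List.min?_id_cons])
  have hmax := PySem.List.max?_isMax (xs := first.2 :: rest.map (fun p => p.2))
    (key := fun y => y) (m := b) (by rw [PySem.List.max?_id_cons])
  have hab : a ≤ b := le_trans (hmin first.2 (List.mem_cons_self ..)) (hmax first.2 (List.mem_cons_self ..))
  show (if 1 ≤ a ∧ a ≤ b ∧ b ≤ 4 then loopA (first :: rest) (PySem.List.pyRange a (b + 1) 1)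
        else false) = _
  by_cases hcase : 1 ≤ a ∧ b ≤ 4
  · rw [if_pos ⟨hcase.1, hab, hcase.2⟩, if_neg (show ¬(a < 1 ∨ 4 < b) by omega), loopA_eq_all]
    have cov1 : ∀ p ∈ first :: rest, p.2 ∈ PySem.List.pyRange a (b + 1) 1 := by
      intro p hp
      have hpf : p.2 ∈ first.2 :: rest.map (fun p => p.2) := by
        rw [← List.map_cons]
        exact List.mem_map.2 ⟨p, hp, rfl⟩
      rw [PySem.List.mem_pyRange_one]
      exact ⟨hmin p.2 hpf, by have h : p.2 ≤ b := hmax p.2 hpf; omega⟩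
    have cov2 : ∀ p ∈ first :: rest, p.2 ∈ PySem.Set.ofList (first.2 :: rest.map (fun p => p.2)) := by
      intro p hp
      rw [PySem.Set.mem_ofList, ← List.map_cons]
      exact List.mem_map.2 ⟨p, hp, rfl⟩
    have h1 := allCover_iff (first :: rest) _ cov1
    have h2 := allCover_iff (first :: rest) _ cov2
    rw [Bool.eq_iff_iff]
    exact h1.trans h2.symm
  · rw [if_neg (show ¬(1 ≤ a ∧ a ≤ b ∧ b ≤ 4) by omega),
      if_pos (show a < 1 ∨ 4 < b by omega)]
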